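-- pv_equiv track=rewrite | github.com/ale-cardosof/teste_chave_criptografia | TestesDeAleatoriedade.py | long_run
-- ===== SOURCE A (Python) =====
-- def long_run(bin_string):
--     count = 1
--     if len(bin_string) > 1:
--         for i in range(1, len(bin_string)):
--             if bin_string[i - 1] == bin_string[i]:
--                 count += 1
--             else:
--                 if count >= 34:
--                     return False
--                 count = 1
--     return True
-- ===== SOURCE B (Python) =====
-- def long_run(bin_string):
--     # Build the run-length table (length of each maximal block of identical
--     # characters), then check every run is shorter than 34 -- including the
--     # final run, which the original never checks before returning True.
--     runs = []
--     last = None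
--     count = 0
--     for ch in bin_string:
--         if ch == last:
--             count += 1
--         else:
--             if count:
--                 runs.append(count)
--             last = ch
--             count = 1
--     if count:
--         runs.append(count)
--     return all(r < 34 for r in runs)
-- ===== Notes on version B (the rewrite author's own statement) =====
-- stated objective: alternative
-- what changed: B builds the run-length table of maximal blocks first and then checks all runs, replacing A's stateful early-return transition counting; B also checks the final run, which A never inspects.
-- intended difference: On strings whose final maximal run of identical characters has length >= 34 while all earlier runs are shorter, A returns True (its loop never checks the count of the last run) and B returns False, which is the intended answer for a detector of long runs. — e.g. on long_run("0000000000000000000000000000000000"): A returns true, B returns false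
import Mathlib
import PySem

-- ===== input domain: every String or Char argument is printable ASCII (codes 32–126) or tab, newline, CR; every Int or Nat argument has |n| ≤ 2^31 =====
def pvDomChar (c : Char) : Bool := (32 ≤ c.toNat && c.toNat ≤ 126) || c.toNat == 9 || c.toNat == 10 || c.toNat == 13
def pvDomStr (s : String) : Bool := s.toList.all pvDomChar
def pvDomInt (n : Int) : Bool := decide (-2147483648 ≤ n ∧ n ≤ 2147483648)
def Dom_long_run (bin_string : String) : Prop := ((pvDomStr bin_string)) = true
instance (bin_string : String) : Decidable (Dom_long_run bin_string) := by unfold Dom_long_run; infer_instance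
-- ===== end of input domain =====

-- B builds the run-length table of maximal blocks and checks every run (including
-- the final one, which A never checks; that corner is stated as D_long_run).


-- ===== PORT A =====
-- A's loop: walk adjacent pairs keeping (previous char, current run count),
-- returning False as soon as a run of length ≥ 34 ENDS.
def loopA : List Char → Char → Nat → Bool
  | [], _, _ => true
  | c :: rest, prev, count =>
    if prev == c then loopA rest c (count + 1)
    else if 34 ≤ count then false
    else loopA rest c 1

def long_run (bin_string : String) : Bool :=
  match bin_string.toList with
  | [] => true
  | c :: rest => loopA rest c 1

-- ===== PORT B =====
-- B's collector loop: state (last : Option Char, count), appending the finished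
-- run length to `runs` at each change of character, and once more at the end.
def collectRuns : List Char → Option Char → Nat → List Nat → List Nat
  | [], _, count, runs => if count ≠ 0 then runs ++ [count] else runs
  | ch :: rest, last, count, runs =>
    if last == some ch then collectRuns rest last (count + 1) runs
    else collectRuns rest (some ch) 1 (if count ≠ 0 then runs ++ [count] else runs)

def long_run_alt (bin_string : String) : Bool :=
  (collectRuns bin_string.toList none 0 []).all (fun r => r < 34)

-- ===== PRECONDITION & SPEC =====
-- D_ is a positional condition on the input only: some 34 consecutive positions
-- hold one repeated character, and every such block of 34 equal characters
-- reaches to the end of the string (i.e. the only long run is the final one).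
def D_long_run (bin_string : String) : Prop :=
  ((List.range bin_string.toList.toArray.size).any (fun i =>
      decide (i + 34 ≤ bin_string.toList.toArray.size) &&
      (List.range 34).all (fun j =>
        bin_string.toList.toArray.getD (i + j) ' ' == bin_string.toList.toArray.getD i ' ')) = true)
  ∧ ((List.range bin_string.toList.toArray.size).all (fun i =>
      !(decide (i + 34 ≤ bin_string.toList.toArray.size) &&
        (List.range 34).all (fun j =>
          bin_string.toList.toArray.getD (i + j) ' ' == bin_string.toList.toArray.getD i ' ')) ||
      (List.range bin_string.toList.toArray.size).all (fun k =>
        decide (k < i + 34) ||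
        (bin_string.toList.toArray.getD k ' ' == bin_string.toList.toArray.getD i ' '))) = true)
instance (bin_string : String) : Decidable (D_long_run bin_string) := by
  unfold D_long_run; infer_instance

def Spec_long_run (bin_string : String) (out : Bool) : Prop :=
  ¬ D_long_run bin_string → out = long_run_alt bin_string
instance (bin_string : String) (out : Bool) : Decidable (Spec_long_run bin_string out) := by
  unfold Spec_long_run; infer_instance

def pvDiffWitness_long_run : String := "0000000000000000000000000000000000"
def pvDiffWitnessOut_long_run : Bool × Bool := (true, false)

-- ===== CLAIM (what is proved, stated in full; the proofs are below) =====
def Claim_unchanged_long_run : Prop :=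
  ∀ (bin_string : String), Dom_long_run bin_string → Spec_long_run bin_string (long_run bin_string)
def Claim_changed_long_run : Prop :=
  Dom_long_run (pvDiffWitness_long_run) ∧ D_long_run (pvDiffWitness_long_run) ∧
    long_run (pvDiffWitness_long_run) = pvDiffWitnessOut_long_run.1 ∧
    long_run_alt (pvDiffWitness_long_run) = pvDiffWitnessOut_long_run.2 ∧
    pvDiffWitnessOut_long_run.1 ≠ pvDiffWitnessOut_long_run.2
def Claim_exact_long_run : Prop :=
  ∀ (bin_string : String), Dom_long_run bin_string → D_long_run bin_string →
    long_run bin_string ≠ long_run_alt bin_string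

-- ===== LEMMAS AND PROOFS =====
-- proof-side window predicates
def Win (cs : List Char) (i : Nat) : Prop :=
  i + 34 ≤ cs.length ∧ ∀ j < 34, cs.getD (i + j) ' ' = cs.getD i ' '

def HasWin (cs : List Char) : Prop := ∃ i, Win cs i

def HasNW (cs : List Char) : Prop :=
  ∃ i, Win cs i ∧ ∃ k, i + 34 ≤ k ∧ k < cs.length ∧ cs.getD k ' ' ≠ cs.getD i ' '

-- proof-side plain run collector (bridges B's collector to the windows)
def goB : List Char → Char → Nat → List Nat
  | [], _, n => [n]
  | c :: rest, prev, n => if prev == c then goB rest c (n + 1) else n :: goB rest c 1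

lemma getD_rep_left {n : Nat} {p : Char} {i : Nat} (v : List Char) (h : i < n) :
    (List.replicate n p ++ v).getD i ' ' = p := by
  rw [List.getD_eq_getElem?_getD, List.getElem?_append_left (by simpa using h)]
  simp [List.getElem?_replicate, h]

lemma getD_rep_right {n : Nat} {p : Char} (v : List Char) (t : Nat) :
    (List.replicate n p ++ v).getD (n + t) ' ' = v.getD t ' ' := by
  rw [List.getD_eq_getElem?_getD, List.getElem?_append_right (by simp)]
  simp [List.getD_eq_getElem?_getD]

lemma win_rep_iff {n : Nat} {p : Char} {i : Nat} :
    Win (List.replicate n p) i ↔ i + 34 ≤ n := by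
  constructor
  · intro h; simpa using h.1
  · intro h
    refine ⟨by simpa using h, fun j hj => ?_⟩
    have h1 : (List.replicate n p ++ ([] : List Char)).getD (i + j) ' ' = p :=
      getD_rep_left [] (by omega)
    have h2 : (List.replicate n p ++ ([] : List Char)).getD i ' ' = p :=
      getD_rep_left [] (by omega)
    simpa using h1.trans h2.symm

lemma hasWin_rep {n : Nat} {p : Char} : HasWin (List.replicate n p) ↔ 34 ≤ n := by
  constructor
  · rintro ⟨i, hi⟩; have := (win_rep_iff.mp hi); omega
  · intro h; exact ⟨0, win_rep_iff.mpr (by omega)⟩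

lemma hasNW_rep {n : Nat} {p : Char} : ¬ HasNW (List.replicate n p) := by
  rintro ⟨i, hw, k, hk1, hk2, hk3⟩
  have hi : i < n := by have := hw.1; simp at this; omega
  have hkn : k < n := by simpa using hk2
  have h1 : (List.replicate n p ++ ([] : List Char)).getD k ' ' = p :=
    getD_rep_left [] hkn
  have h2 : (List.replicate n p ++ ([] : List Char)).getD i ' ' = p :=
    getD_rep_left [] hi
  simp only [List.append_nil] at h1 h2
  exact hk3 (h1.trans h2.symm)

lemma win_shift {n : Nat} {p : Char} (v : List Char) (t : Nat) :
    Win v t ↔ Win (List.replicate n p ++ v) (n + t) := by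
  unfold Win
  constructor
  · rintro ⟨h1, h2⟩
    refine ⟨by simp; omega, fun j hj => ?_⟩
    rw [show n + t + j = n + (t + j) by omega, getD_rep_right, getD_rep_right]
    exact h2 j hj
  · rintro ⟨h1, h2⟩
    refine ⟨by simp at h1; omega, fun j hj => ?_⟩
    have := h2 j hj
    rw [show n + t + j = n + (t + j) by omega, getD_rep_right, getD_rep_right] at this
    exact this

lemma win_cases {n : Nat} {p c : Char} {r : List Char} {i : Nat} (hpc : p ≠ c)
    (hw : Win (List.replicate n p ++ c :: r) i) : i + 34 ≤ n ∨ n ≤ i := by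
  by_contra hc
  push_neg at hc
  obtain ⟨hlt, hge⟩ := hc
  -- the window contains both index n-1 (char p) and index n (char c)
  have hn1 : (List.replicate n p ++ c :: r).getD (n - 1) ' ' = p :=
    getD_rep_left _ (by omega)
  have hn2 : (List.replicate n p ++ c :: r).getD n ' ' = c := by
    have := getD_rep_right (n := n) (p := p) (c :: r) 0
    simpa using this
  have hbase : (List.replicate n p ++ c :: r).getD i ' ' = p :=
    getD_rep_left _ (by omega)
  have e1 := hw.2 (n - 1 - i) (by omega)
  have e2 := hw.2 (n - i) (by omega)
  rw [show i + (n - 1 - i) = n - 1 by omega] at e1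
  rw [show i + (n - i) = n by omega] at e2
  rw [hn1, hbase] at e1
  rw [hn2, hbase] at e2
  exact hpc (e1 ▸ e2.symm ▸ rfl)

lemma hasWin_app {n : Nat} {p c : Char} {r : List Char} (hpc : p ≠ c) (hn : 1 ≤ n) :
    HasWin (List.replicate n p ++ c :: r) ↔ 34 ≤ n ∨ HasWin (c :: r) := by
  constructor
  · rintro ⟨i, hw⟩
    rcases win_cases hpc hw with h | h
    · left; omega
    · right
      exact ⟨i - n, (win_shift (c :: r) (i - n)).mpr (by rwa [show n + (i - n) = i by omega])⟩
  · rintro (h | ⟨t, ht⟩)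
    · refine ⟨0, ⟨by simp; omega, fun j hj => ?_⟩⟩
      rw [getD_rep_left _ (by omega), getD_rep_left _ (by omega)]
    · exact ⟨n + t, (win_shift (c :: r) t).mp ht⟩

lemma hasNW_app {n : Nat} {p c : Char} {r : List Char} (hpc : p ≠ c) (hn : 1 ≤ n) :
    HasNW (List.replicate n p ++ c :: r) ↔ 34 ≤ n ∨ HasNW (c :: r) := by
  constructor
  · rintro ⟨i, hw, k, hk1, hk2, hk3⟩
    rcases win_cases hpc hw with h | h
    · left; omega
    · right
      refine ⟨i - n, (win_shift (c :: r) (i - n)).mpr (by rwa [show n + (i - n) = i by omega]),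
        k - n, by omega, by simp at hk2 ⊢; omega, ?_⟩
      have e1 : (List.replicate n p ++ c :: r).getD k ' ' = (c :: r).getD (k - n) ' ' := by
        rw [show k = n + (k - n) by omega, getD_rep_right, Nat.add_sub_cancel_left]
      have e2 : (List.replicate n p ++ c :: r).getD i ' ' = (c :: r).getD (i - n) ' ' := by
        rw [show i = n + (i - n) by omega, getD_rep_right, Nat.add_sub_cancel_left]
      rw [← e1, ← e2]
      exact hk3
  · rintro (h | ⟨t, ht, k, hk1, hk2, hk3⟩)
    · refine ⟨0, ⟨by simp; omega, fun j hj => ?_⟩, n, by omega, by simp, ?_⟩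
      · rw [getD_rep_left _ (by omega), getD_rep_left _ (by omega)]
      · have h1 : (List.replicate n p ++ c :: r).getD n ' ' = c := by
          have := getD_rep_right (n := n) (p := p) (c :: r) 0
          simpa using this
        have h2 : (List.replicate n p ++ c :: r).getD 0 ' ' = p :=
          getD_rep_left _ (by omega)
        rw [h1, h2]
        exact fun he => hpc he.symm
    · refine ⟨n + t, (win_shift (c :: r) t).mp ht, n + k, by omega, by simp at hk2 ⊢; omega, ?_⟩
      rw [getD_rep_right, getD_rep_right]
      exact hk3

lemma rep_absorb (n : Nat) (p : Char) (r : List Char) :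
    List.replicate n p ++ p :: r = List.replicate (n + 1) p ++ r := by
  rw [List.replicate_succ']
  simp

lemma LB (rest : List Char) : ∀ (prev : Char) (n : Nat), 1 ≤ n →
    (((goB rest prev n).all (fun r => r < 34)) = false ↔
      HasWin (List.replicate n prev ++ rest)) := by
  induction rest with
  | nil =>
    intro prev n hn
    simp only [goB, List.all_cons, List.all_nil, List.append_nil, Bool.and_true, hasWin_rep]
    simp
  | cons c r ih =>
    intro prev n hn
    simp only [goB]
    by_cases h : prev = c
    · subst h
      rw [if_pos (by simp), rep_absorb]
      exact ih prev (n + 1) (by omega)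
    · rw [if_neg (by simpa using h), hasWin_app h hn]
      have := ih c 1 (by omega)
      simp only [List.replicate_one, List.singleton_append] at this
      simp only [List.all_cons, Bool.and_eq_false_iff, this]
      constructor
      · rintro (h1 | h1)
        · left; simpa using h1
        · right; exact h1
      · rintro (h1 | h1)
        · left; simpa using h1
        · right; exact h1

lemma LA (rest : List Char) : ∀ (prev : Char) (n : Nat), 1 ≤ n →
    ((loopA rest prev n = false) ↔ HasNW (List.replicate n prev ++ rest)) := by
  induction rest with
  | nil =>
    intro prev n hn
    simp only [loopA, List.append_nil]
    simpa using hasNW_rep (n := n) (p := prev)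
  | cons c r ih =>
    intro prev n hn
    simp only [loopA]
    by_cases h : prev = c
    · subst h
      rw [if_pos (by simp), rep_absorb]
      exact ih prev (n + 1) (by omega)
    · rw [if_neg (by simpa using h), hasNW_app h hn]
      have := ih c 1 (by omega)
      simp only [List.replicate_one, List.singleton_append] at this
      by_cases h34 : 34 ≤ n
      · simp [h34]
      · simp only [if_neg h34, this]
        constructor
        · intro h1; right; exact h1
        · rintro (h1 | h1)
          · omega
          · exact h1

lemma collectRuns_some (rest : List Char) (prev : Char) (n : Nat) (runs : List Nat)
    (hn : n ≠ 0) : collectRuns rest (some prev) n runs = runs ++ goB rest prev n := by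
  induction rest generalizing prev n runs with
  | nil => simp [collectRuns, goB, hn]
  | cons c r ih =>
    simp only [collectRuns, goB]
    by_cases h : prev = c
    · subst h
      rw [if_pos (by simp), if_pos (by simp)]
      exact ih _ _ _ (by omega)
    · have hb : (some prev == some c) = false := by simp [h]
      have hb' : (prev == c) = false := by simp [h]
      rw [hb, hb']
      simp only [Bool.false_eq_true, if_false, if_pos hn]
      rw [ih c 1 _ (by omega)]
      simp

lemma B_char (s : String) : (long_run_alt s = false) ↔ HasWin s.toList := by
  unfold long_run_alt
  cases hs : s.toList with
  | nil =>
    simp only [collectRuns]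
    constructor
    · intro h; simp at h
    · rintro ⟨i, hw⟩; have := hw.1; simp at this
  | cons c rest =>
    rw [show collectRuns (c :: rest) none 0 [] = collectRuns rest (some c) 1 [] from rfl,
      collectRuns_some rest c 1 [] (by omega), List.nil_append]
    have := LB rest c 1 (by omega)
    simpa using this

lemma A_char (s : String) : (long_run s = false) ↔ HasNW s.toList := by
  unfold long_run
  cases hs : s.toList with
  | nil =>
    constructor
    · intro h; simp at h
    · rintro ⟨i, hw, _⟩; have := hw.1; simp at this
  | cons c rest =>
    show loopA rest c 1 = false ↔ _
    have := LA rest c 1 (by omega)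
    simpa using this

lemma NW_imp_W {cs : List Char} : HasNW cs → HasWin cs := by
  rintro ⟨i, hw, _⟩; exact ⟨i, hw⟩

lemma D_iff (s : String) : D_long_run s ↔ (HasWin s.toList ∧ ¬ HasNW s.toList) := by
  unfold D_long_run HasWin HasNW Win
  simp only [List.any_eq_true, List.all_eq_true, List.mem_range, Bool.and_eq_true,
    decide_eq_true_eq, beq_iff_eq, Bool.or_eq_true, Bool.not_eq_eq_eq_not, Bool.not_true,
    Bool.and_eq_false_iff, Array.getD_eq_getD_getElem?, List.getElem?_toArray,
    List.size_toArray, ← List.getD_eq_getElem?_getD]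
  constructor
  · rintro ⟨⟨i, hi, h34, hwin⟩, hall⟩
    refine ⟨⟨i, h34, hwin⟩, ?_⟩
    rintro ⟨i', ⟨h34', hwin'⟩, k, hk1, hk2, hk3⟩
    have hlen : s.toList.length = s.length := String.length_toList
    have := hall i' (by omega)
    rcases this with h | h
    · rcases h with h | h
      · rw [decide_eq_false_iff_not] at h; omega
      · rcases List.all_eq_false.mp h with ⟨j, hj, hjf⟩
        simp only [List.mem_range] at hj
        simp only [Bool.not_eq_true, beq_eq_false_iff_ne, ne_eq,
          Array.getD_eq_getD_getElem?, List.getElem?_toArray,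
          ← List.getD_eq_getElem?_getD] at hjf
        exact hjf (hwin' j hj)
    · have := h k hk2
      rcases this with h' | h'
      · omega
      · exact hk3 h'
  · rintro ⟨⟨i, h34, hwin⟩, hnw⟩
    refine ⟨⟨i, by omega, h34, hwin⟩, fun i' hi' => ?_⟩
    by_cases hw' : i' + 34 ≤ s.toList.length ∧ ∀ j < 34, s.toList.getD (i' + j) ' ' = s.toList.getD i' ' '
    · right
      intro k hk
      by_cases hlt : k < i' + 34
      · left; exact hlt
      · right
        by_contra hne
        exact hnw ⟨i', hw', k, by omega, hk, hne⟩
    · left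
      rw [not_and_or] at hw'
      rcases hw' with h | h
      · left; simpa using h
      · right
        push_neg at h
        obtain ⟨j, hj, hjne⟩ := h
        refine List.all_eq_false.mpr ⟨j, by simpa using hj, ?_⟩
        simp only [Bool.not_eq_true, beq_eq_false_iff_ne, ne_eq,
          Array.getD_eq_getD_getElem?, List.getElem?_toArray,
          ← List.getD_eq_getElem?_getD]
        exact hjne

theorem long_run_spec : Claim_unchanged_long_run := by
  intro s _ hD
  show long_run s = long_run_alt s
  rw [D_iff] at hD
  by_cases hW : HasWin s.toList
  · have hNW : HasNW s.toList := by
      by_contra hc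
      exact hD ⟨hW, hc⟩
    rw [(A_char s).mpr hNW, (B_char s).mpr hW]
  · have hNW : ¬ HasNW s.toList := fun h => hW (NW_imp_W h)
    have hA : long_run s = true := by
      cases h : long_run s
      · exact absurd ((A_char s).mp h) hNW
      · rfl
    have hB : long_run_alt s = true := by
      cases h : long_run_alt s
      · exact absurd ((B_char s).mp h) hW
      · rfl
    rw [hA, hB]

theorem long_run_changed : Claim_changed_long_run := by
  unfold Claim_changed_long_run; decide

theorem long_run_tight : Claim_exact_long_run := by
  intro s _ hD
  rw [D_iff] at hD
  obtain ⟨hW, hNW⟩ := hD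
  have hA : long_run s = true := by
    cases h : long_run s
    · exact absurd ((A_char s).mp h) hNW
    · rfl
  rw [hA, (B_char s).mpr hW]
  simp
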